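-- pv_equiv track=rewrite | github.com/PhoenixWingsCode/DSA-using-Python | Graphs/Shortest Path/dfs.py | dfs
-- ===== SOURCE A (Python) =====
-- def dfs(graph, start, end, path=[], shortest=None):
--     path = path + [start]
--     if start == end:
--         return path
--     if start not in graph:
--         return None
--     for node in graph[start]:
--         if node not in path:
--             new_path = dfs(graph, node, end, path, shortest)
--             if new_path:
--                 if not shortest or len(new_path) < len(shortest):
--                     shortest = new_path
--     return shortest
-- ===== SOURCE B (Python) =====
-- def dfs(graph, start, end, path=[], shortest=None):
--     # Different decomposition: enumerate all simple paths first, then select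
--     # the best (first strictly-shorter wins) in a separate pass.
--     path = path + [start]
--     if start == end:
--         return path
--     if start not in graph:
--         return None
--
--     def all_paths(node, p):
--         if node == end:
--             return [p]
--         result = []
--         for nb in graph.get(node, []):
--             if nb not in p:
--                 result.extend(all_paths(nb, p + [nb]))
--         return result
--
--     best = shortest
--     for cand in all_paths(start, path):
--         if not best or len(cand) < len(best):
--             best = cand
--     return best
-- ===== Notes on version B (the rewrite author's own statement) =====
-- stated objective: alternative
-- what changed: B separates concerns: a pure recursive enumerator builds the list of all simple paths from start to end, and a separate selection fold then picks the first strictly-shorter candidate, instead of A's single recursion that threads the current best downward and updates it during the search.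
import Mathlib
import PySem

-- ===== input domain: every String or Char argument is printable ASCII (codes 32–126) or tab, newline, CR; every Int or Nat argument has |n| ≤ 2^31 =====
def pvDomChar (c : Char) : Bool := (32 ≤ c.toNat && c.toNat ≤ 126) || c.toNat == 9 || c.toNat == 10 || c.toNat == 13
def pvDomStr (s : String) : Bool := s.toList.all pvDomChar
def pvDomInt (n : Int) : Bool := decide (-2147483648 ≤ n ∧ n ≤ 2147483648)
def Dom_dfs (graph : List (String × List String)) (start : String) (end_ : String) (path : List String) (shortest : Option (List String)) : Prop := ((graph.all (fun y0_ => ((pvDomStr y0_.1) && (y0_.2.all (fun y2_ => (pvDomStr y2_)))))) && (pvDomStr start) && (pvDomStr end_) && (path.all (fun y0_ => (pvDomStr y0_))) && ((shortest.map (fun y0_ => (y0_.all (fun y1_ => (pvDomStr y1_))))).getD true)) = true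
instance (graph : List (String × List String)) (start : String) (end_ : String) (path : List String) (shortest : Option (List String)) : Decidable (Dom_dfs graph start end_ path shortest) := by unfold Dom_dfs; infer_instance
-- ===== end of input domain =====

-- B replaces A's best-threading recursion by a pure all-simple-paths enumerator plus a
-- separate selection fold (alternative decomposition, same cost); return values only, no mutation.

-- ===== PORT A =====
-- `if new_path: if not shortest or len(new_path) < len(shortest): shortest = new_path`
-- (Python truthiness: None and the empty list are falsy)
def pvCallerUpd (shortest : Option (List String)) (new_path : Option (List String)) : Option (List String) :=
  match new_path with
  | none => shortest
  | some l =>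
    if l.isEmpty then shortest
    else
      match shortest with
      | none => some l
      | some m => if m.isEmpty then some l else if l.length < m.length then some l else shortest

-- A's recursion, with a fuel counter as a totality guard only: the initial fuel
-- (number of neighbour entries + 1) exceeds the recursion depth, which adds a distinct
-- neighbour node to `path` at each level, so the 0-fuel branch is never reached.
def dfsFuelA (graph : List (String × List String)) (end_ : String) :
    Nat → String → List String → Option (List String) → Option (List String)
  | 0, _, _, _ => none
  | fuel+1, start, path, shortest =>
    let path := path ++ [start]                  -- path = path + [start]
    if start = end_ then some path               -- if start == end: return path
    else
      match (PySem.Dict.mk graph).get? start with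
      | none => none                             -- if start not in graph: return None
      | some nbrs =>
        nbrs.foldl (fun shortest node =>         -- for node in graph[start]:
          if node ∈ path then shortest           --   (skip when node in path)
          else pvCallerUpd shortest (dfsFuelA graph end_ fuel node path shortest))
          shortest                               -- return shortest

def dfs (graph : List (String × List String)) (start : String) (end_ : String) (path : List String) (shortest : Option (List String)) : Option (List String) :=
  dfsFuelA graph end_ ((graph.flatMap Prod.snd).length + 1) start path shortest

-- ===== PORT B =====
-- `if not best or len(cand) < len(best): best = cand`
def pvUpdB (best : Option (List String)) (cand : List String) : Option (List String) :=
  match best with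
  | none => some cand
  | some m => if m.isEmpty then some cand else if cand.length < m.length then some cand else best

-- Source B's inner `all_paths(node, p)`; same fuel totality guard as A's port.
def allPathsB (graph : List (String × List String)) (end_ : String) :
    Nat → String → List String → List (List String)
  | 0, _, _ => []
  | fuel+1, node, p =>
    if node = end_ then [p]                        -- if node == end: return [p]
    else
      ((PySem.Dict.mk graph).getD node []).foldl   -- for nb in graph.get(node, []):
        (fun result nb =>
          if nb ∈ p then result                    --   if nb not in p:
          else result ++ allPathsB graph end_ fuel nb (p ++ [nb]))  -- result.extend(...)
        []

def dfs_alt (graph : List (String × List String)) (start : String) (end_ : String) (path : List String) (shortest : Option (List String)) : Option (List String) :=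
  let path := path ++ [start]
  if start = end_ then some path
  else
    match (PySem.Dict.mk graph).get? start with
    | none => none
    | some _ =>
      (allPathsB graph end_ ((graph.flatMap Prod.snd).length + 1) start path).foldl
        pvUpdB shortest

-- ===== PRECONDITION & SPEC =====
def Spec_dfs (graph : List (String × List String)) (start : String) (end_ : String) (path : List String) (shortest : Option (List String)) (out : Option (List String)) : Prop := out = dfs_alt graph start end_ path shortest
instance (graph : List (String × List String)) (start : String) (end_ : String) (path : List String) (shortest : Option (List String)) (out : Option (List String)) : Decidable (Spec_dfs graph start end_ path shortest out) := by unfold Spec_dfs; infer_instance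

-- ===== CLAIM (what is proved, stated in full; the proofs are below) =====
def Claim_equal_dfs : Prop := ∀ (graph : List (String × List String)) (start : String) (end_ : String) (path : List String) (shortest : Option (List String)), Dom_dfs graph start end_ path shortest → Spec_dfs graph start end_ path shortest (dfs graph start end_ path shortest)

-- ===== LEMMAS AND PROOFS =====

-- `Imp sh l`: updating sh by the nonempty candidate l passed A's/B's test.
def pvImp (sh : Option (List String)) (l : List String) : Prop :=
  sh = none ∨ ∃ m, sh = some m ∧ (m.isEmpty = true ∨ l.length < m.length)

-- characterisation of the selection fold: it returns sh or an admitted nonempty candidate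
theorem pvFold_char (L : List (List String)) (sh : Option (List String))
    (hne : ∀ l ∈ L, l ≠ []) :
    L.foldl pvUpdB sh = sh ∨
      ∃ l, L.foldl pvUpdB sh = some l ∧ l ≠ [] ∧ pvImp sh l := by
  induction L generalizing sh with
  | nil => exact Or.inl rfl
  | cons x L ih =>
    have hx : x ≠ [] := hne x (by simp)
    have hne' : ∀ l ∈ L, l ≠ [] := fun l hl => hne l (by simp [hl])
    have hstep : pvUpdB sh x = sh ∨ (pvUpdB sh x = some x ∧ pvImp sh x) := by
      unfold pvUpdB pvImp
      cases sh with
      | none => exact Or.inr ⟨rfl, Or.inl rfl⟩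
      | some m =>
        by_cases hm : m.isEmpty = true
        · exact Or.inr ⟨by simp [hm], Or.inr ⟨m, rfl, Or.inl hm⟩⟩
        · by_cases hl : x.length < m.length
          · exact Or.inr ⟨by simp [hm, hl], Or.inr ⟨m, rfl, Or.inr hl⟩⟩
          · exact Or.inl (by simp [hm, hl])
    rcases ih (pvUpdB sh x) hne' with h | ⟨l, hl, hlne, himp⟩
    · simp only [List.foldl_cons, h]
      rcases hstep with h1 | ⟨h1, h2⟩
      · exact Or.inl h1
      · exact Or.inr ⟨x, h1, hx, h2⟩
    · refine Or.inr ⟨l, by simpa using hl, hlne, ?_⟩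
      rcases hstep with h1 | ⟨h1, h2⟩
      · rwa [h1] at himp
      · -- sh updated to some x, then improved to l
        rw [h1] at himp
        rcases himp with h | ⟨m, hm, hcase⟩
        · exact absurd h (by simp)
        · have hmx : x = m := by simpa using hm
          subst hmx
          have hxe : x.isEmpty = false := by simpa [List.isEmpty_iff] using hx
          have hlx : l.length < x.length := by
            rcases hcase with hc | hc
            · rw [hxe] at hc; exact absurd hc (by simp)
            · exact hc
          rcases h2 with h2 | ⟨m', hm', hc'⟩
          · exact Or.inl h2
          · refine Or.inr ⟨m', hm', ?_⟩
            rcases hc' with hc' | hc'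
            · exact Or.inl hc'
            · exact Or.inr (Nat.lt_trans hlx hc')

-- absorption: applying A's caller update to the result of the selection fold is a no-op
theorem pvCallerUpd_fold (L : List (List String)) (sh : Option (List String))
    (hne : ∀ l ∈ L, l ≠ []) :
    pvCallerUpd sh (L.foldl pvUpdB sh) = L.foldl pvUpdB sh := by
  rcases pvFold_char L sh hne with h | ⟨l, hl, hlne, himp⟩
  · rw [h]
    unfold pvCallerUpd
    cases sh with
    | none => rfl
    | some m =>
      by_cases hm : m.isEmpty = true
      · simp [hm]
      · simp [hm]
  · rw [hl]
    unfold pvCallerUpd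
    have hl' : l.isEmpty = false := by simpa [List.isEmpty_iff] using hlne
    rcases himp with h | ⟨m, hm, hc⟩
    · simp [h, hl']
    · subst hm
      rcases hc with hc | hc
      · simp [hl', hc]
      · by_cases hm' : m.isEmpty = true
        · simp [hl', hm']
        · simp [hl', hm', hc]

-- every path produced by the enumerator extends its nonempty argument
theorem allPathsB_ne (graph : List (String × List String)) (end_ : String) :
    ∀ (fuel : Nat) (node : String) (p : List String), p ≠ [] →
      ∀ l ∈ allPathsB graph end_ fuel node p, l ≠ [] := by
  intro fuel
  induction fuel with
  | zero => intro node p _ l hl; simp [allPathsB] at hl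
  | succ fuel ih =>
    intro node p hp l hl
    unfold allPathsB at hl
    by_cases hnode : node = end_
    · simp [hnode] at hl; simpa [hl] using hp
    · simp only [if_neg hnode] at hl
      -- membership in the accumulating fold comes from some recursive chunk
      have key : ∀ (ns : List String) (acc : List (List String)),
          (∀ l' ∈ acc, l' ≠ []) →
          l ∈ ns.foldl (fun result nb => if nb ∈ p then result
                else result ++ allPathsB graph end_ fuel nb (p ++ [nb])) acc → l ≠ [] := by
        intro ns
        induction ns with
        | nil => intro acc hacc hmem; exact hacc l hmem
        | cons nb ns ihn =>
          intro acc hacc hmem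
          simp only [List.foldl_cons] at hmem
          by_cases hin : nb ∈ p
          · exact ihn acc hacc (by simpa [hin] using hmem)
          · refine ihn _ ?_ (by simpa [hin] using hmem)
            intro l' hl'
            rcases List.mem_append.1 hl' with h | h
            · exact hacc l' h
            · exact ih nb (p ++ [nb]) (by simp) l' h
      exact key _ [] (by simp) hl

-- fold fusion: A's neighbour loop equals the selection fold over the concatenated chunks
theorem pvFusion (P : String → List (List String)) (stepA : Option (List String) → String → Option (List String))
    (p : List String)
    (H : ∀ (node : String) (sh : Option (List String)), node ∉ p → stepA sh node = (P node).foldl pvUpdB sh) :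
    ∀ (ns : List String) (acc : List (List String)) (sh : Option (List String)),
      ns.foldl (fun sh node => if node ∈ p then sh else stepA sh node) (acc.foldl pvUpdB sh)
        = (ns.foldl (fun result nb => if nb ∈ p then result else result ++ P nb) acc).foldl pvUpdB sh := by
  intro ns
  induction ns with
  | nil => intro acc sh; simp
  | cons nb ns ihn =>
    intro acc sh
    simp only [List.foldl_cons]
    by_cases hin : nb ∈ p
    · simpa [hin] using ihn acc sh
    · simp only [if_neg hin, H nb _ hin]
      rw [← List.foldl_append]
      exact ihn (acc ++ P nb) sh

-- main invariant: A's per-child caller update equals B's selection fold over the child's chunk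
theorem pvMain (graph : List (String × List String)) (end_ : String) :
    ∀ (fuel : Nat) (node : String) (p : List String) (sh : Option (List String)),
      pvCallerUpd sh (dfsFuelA graph end_ fuel node p sh)
        = (allPathsB graph end_ fuel node (p ++ [node])).foldl pvUpdB sh := by
  intro fuel
  induction fuel with
  | zero => intro node p sh; simp [dfsFuelA, allPathsB, pvCallerUpd]
  | succ fuel ih =>
    intro node p sh
    unfold dfsFuelA allPathsB
    by_cases hnode : node = end_
    · simp only [if_pos hnode, List.foldl_cons, List.foldl_nil]
      unfold pvCallerUpd pvUpdB
      cases sh with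
      | none => simp
      | some m => by_cases hm : m.isEmpty = true <;> simp [hm]
    · simp only [if_neg hnode]
      cases hget : (PySem.Dict.mk graph).get? node with
      | none =>
        have hgd : (PySem.Dict.mk graph).getD node [] = [] := by
          simp [PySem.Dict.getD_eq_get?_getD, hget]
        simp [hgd, pvCallerUpd]
      | some nbrs =>
        have hgetD : (PySem.Dict.mk graph).getD node [] = nbrs := by
          simp [PySem.Dict.getD_eq_get?_getD, hget]
        simp only [hgetD]
        have hfus := pvFusion (fun nb => allPathsB graph end_ fuel nb ((p ++ [node]) ++ [nb]))
          (fun sh c => pvCallerUpd sh (dfsFuelA graph end_ fuel c (p ++ [node]) sh))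
          (p ++ [node]) (fun c sh _ => ih c (p ++ [node]) sh) nbrs [] sh
        simp only [List.foldl_nil] at hfus
        rw [hfus]
        have hAP : nbrs.foldl (fun result nb => if nb ∈ p ++ [node] then result
              else result ++ allPathsB graph end_ fuel nb ((p ++ [node]) ++ [nb])) []
            = allPathsB graph end_ (fuel + 1) node (p ++ [node]) := by
          conv_rhs => unfold allPathsB
          simp [hnode, hgetD]
        rw [hAP]
        exact pvCallerUpd_fold _ sh (allPathsB_ne graph end_ (fuel + 1) node (p ++ [node]) (by simp))

-- ===== VERDICT (by name: the statement is the Claim_ definition above) =====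
theorem dfs_spec : Claim_equal_dfs := by
  intro graph start end_ path shortest _
  unfold Spec_dfs dfs dfs_alt
  simp only []
  rw [dfsFuelA]
  by_cases hs : start = end_
  · simp [hs]
  · simp only [if_neg hs]
    cases hget : (PySem.Dict.mk graph).get? start with
    | none => simp
    | some nbrs =>
      simp only []
      conv_rhs => unfold allPathsB
      have hgetD : (PySem.Dict.mk graph).getD start [] = nbrs := by
        simp [PySem.Dict.getD_eq_get?_getD, hget]
      simp only [if_neg hs, hgetD]
      have hfus := pvFusion
        (fun nb => allPathsB graph end_ ((graph.flatMap Prod.snd).length) nb ((path ++ [start]) ++ [nb]))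
        (fun sh c => pvCallerUpd sh (dfsFuelA graph end_ ((graph.flatMap Prod.snd).length) c (path ++ [start]) sh))
        (path ++ [start])
        (fun c sh _ => pvMain graph end_ ((graph.flatMap Prod.snd).length) c (path ++ [start]) sh)
        nbrs [] shortest
      simpa using hfus
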